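-- pv_equiv track=rewrite | github.com/CRAJKUMARSINGH/BillGeneratorContractor | BillGeneratorContractor/simple_work_order_processor.py | find_item_descriptions
-- ===== SOURCE A (Python) =====
-- def find_item_descriptions(ocr_text, item_numbers):
--     """Try to find descriptions for item numbers in OCR text"""
--     descriptions = {}
--
--     for item_num in item_numbers:
--         # Look for item number in text
--         lines = ocr_text.split('\n')
--         for i, line in enumerate(lines):
--             if item_num in line:
--                 # Try to get description from surrounding lines
--                 description = line.strip()
--                 # Look for next few lines that might contain description
--                 for j in range(i+1, min(i+5, len(lines))):
--                     next_line = lines[j].strip()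
--                     if next_line and not any(char.isdigit() for char in next_line[:10]):
--                         description += " " + next_line
--                         break
--                 descriptions[item_num] = description[:200]  # Limit length
--                 break
--
--     return descriptions
-- ===== SOURCE B (Python) =====
-- def _desc(lines, i):
--     d = lines[i].strip()
--     for j in range(i + 1, min(i + 5, len(lines))):
--         nl = lines[j].strip()
--         if nl and not any(c.isdigit() for c in nl[:10]):
--             d += " " + nl
--             break
--     return d[:200]
--
--
-- def find_item_descriptions(ocr_text, item_numbers):
--     """Single forward pass over the lines with a shrinking pending set."""
--     lines = ocr_text.split('\n')
--     pending = list(dict.fromkeys(item_numbers))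
--     found = {}
--     for i, line in enumerate(lines):
--         if not pending:
--             break
--         matched = [it for it in pending if it in line]
--         pending = [it for it in pending if it not in line]
--         for it in matched:
--             found[it] = _desc(lines, i)
--     return {it: found[it] for it in item_numbers if it in found}
-- ===== Notes on version B (the rewrite author's own statement) =====
-- stated objective: alternative
-- what changed: B splits the text into lines once and walks the lines in a single forward pass over a shrinking pending set of still-unmatched items (with early exit when it empties), then emits the descriptions in item_numbers order, instead of re-splitting the text and re-scanning all lines separately for every item.
import Mathlib
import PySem

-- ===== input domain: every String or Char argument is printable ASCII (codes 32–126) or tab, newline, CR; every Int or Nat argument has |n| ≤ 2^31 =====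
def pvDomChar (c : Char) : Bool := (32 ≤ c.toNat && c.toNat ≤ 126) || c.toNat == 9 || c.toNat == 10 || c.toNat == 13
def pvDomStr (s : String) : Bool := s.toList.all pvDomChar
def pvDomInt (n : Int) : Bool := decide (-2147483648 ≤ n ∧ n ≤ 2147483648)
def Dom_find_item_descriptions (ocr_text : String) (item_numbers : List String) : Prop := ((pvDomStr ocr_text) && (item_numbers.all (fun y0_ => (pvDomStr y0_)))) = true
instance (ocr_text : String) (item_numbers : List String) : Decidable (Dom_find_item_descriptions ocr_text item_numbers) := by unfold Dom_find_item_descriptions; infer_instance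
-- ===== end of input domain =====

-- B splits the text into lines once and makes a single forward pass with a shrinking
-- pending set and early exit, instead of re-splitting and re-scanning for every item.

-- ===== PORT A =====

-- the inner 'for j in range(i+1, min(i+5, len(lines)))' scan with break
-- (textually identical in A and in B's helper _desc, hence shared)
def pvNextScan (lines : List String) : List Int → Option String
  | [] => none
  | j :: rest =>
    let next_line := PySem.Str.strip ((PySem.List.pyGet? lines j).getD "")
    if next_line ≠ "" ∧ ¬ ((PySem.Str.slice next_line none (some 10)).toList.any PySem.Chars.isdigit) then
      some next_line
    else pvNextScan lines rest

-- 'for i, line in enumerate(lines): if item_num in line: … break'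
def pvFindA (item_num : String) : List (Int × String) → Option (Int × String)
  | [] => none
  | (i, line) :: rest =>
    if PySem.Str.isIn item_num line then some (i, line) else pvFindA item_num rest

def find_item_descriptions (ocr_text : String) (item_numbers : List String) : List (String × String) :=
  (item_numbers.foldl (fun descriptions item_num =>
      let lines := (PySem.Str.split? ocr_text "\n").getD []
      match pvFindA item_num (PySem.List.enumerate lines) with
      | none => descriptions
      | some (i, line) =>
        let description := PySem.Str.strip line
        let description :=
          match pvNextScan lines (PySem.List.pyRange (i + 1) (min (i + 5) (PySem.List.len lines)) 1) with
          | some next_line => description ++ " " ++ next_line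
          | none => description
        descriptions.insert item_num (PySem.Str.slice description none (some 200)))
    PySem.Dict.empty).items

-- ===== PORT B =====

-- helper _desc(lines, i)
def pvDescB (lines : List String) (i : Int) : String :=
  let d := PySem.Str.strip ((PySem.List.pyGet? lines i).getD "")
  let d :=
    match pvNextScan lines (PySem.List.pyRange (i + 1) (min (i + 5) (PySem.List.len lines)) 1) with
    | some nl => d ++ " " ++ nl
    | none => d
  PySem.Str.slice d none (some 200)

-- the 'for i, line in enumerate(lines)' pass with the pending set and early break
def pvLoopB (lines : List String) :
    List (Int × String) → List String → PySem.Dict String String → PySem.Dict String String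
  | [], _, found => found
  | (i, line) :: rest, pending, found =>
    if pending.isEmpty then found
    else
      let matched := pending.filter (fun it => PySem.Str.isIn it line)
      let pending' := pending.filter (fun it => ¬ PySem.Str.isIn it line)
      let found' := matched.foldl (fun f it => f.insert it (pvDescB lines i)) found
      pvLoopB lines rest pending' found'

def find_item_descriptions_alt (ocr_text : String) (item_numbers : List String) : List (String × String) :=
  let lines := (PySem.Str.split? ocr_text "\n").getD []
  let found := pvLoopB lines (PySem.List.enumerate lines) (PySem.List.dedup item_numbers) PySem.Dict.empty
  (item_numbers.foldl (fun d it =>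
      if found.contains it then d.insert it ((found.get? it).getD "") else d)
    PySem.Dict.empty).items

-- ===== PRECONDITION & SPEC =====
def Spec_find_item_descriptions (ocr_text : String) (item_numbers : List String) (out : List (String × String)) : Prop := out = find_item_descriptions_alt ocr_text item_numbers
instance (ocr_text : String) (item_numbers : List String) (out : List (String × String)) : Decidable (Spec_find_item_descriptions ocr_text item_numbers out) := by unfold Spec_find_item_descriptions; infer_instance

-- ===== CLAIM (what is proved, stated in full; the proofs are below) =====
def Claim_equal_find_item_descriptions : Prop := ∀ (ocr_text : String) (item_numbers : List String), Dom_find_item_descriptions ocr_text item_numbers → Spec_find_item_descriptions ocr_text item_numbers (find_item_descriptions ocr_text item_numbers)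

-- ===== LEMMAS AND PROOFS =====

-- inserting the same value for every key of 'matched'
theorem pv_get?_foldl_insert_const (matched : List String) (v : String)
    (found : PySem.Dict String String) (it : String) :
    (matched.foldl (fun f k => f.insert k v) found).get? it =
      if it ∈ matched then some v else found.get? it := by
  induction matched generalizing found with
  | nil => simp
  | cons m ms ih =>
    simp only [List.foldl_cons, ih, List.mem_cons]
    by_cases hm : it ∈ ms
    · simp [hm]
    · by_cases he : it = m
      · subst he; simp [hm, PySem.Dict.get?_insert_self]
      · simp [hm, he, PySem.Dict.get?_insert]

-- loop invariant for B's single pass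
theorem pv_loopB_get? (lines : List String) (enum : List (Int × String))
    (pending : List String) (found : PySem.Dict String String) (it : String) :
    (pvLoopB lines enum pending found).get? it =
      if it ∈ pending then
        (match pvFindA it enum with
         | some (i, _) => some (pvDescB lines i)
         | none => found.get? it)
      else found.get? it := by
  induction enum generalizing pending found with
  | nil => simp [pvLoopB, pvFindA]
  | cons p rest ih =>
    obtain ⟨i, line⟩ := p
    by_cases hp : pending = []
    · subst hp; simp [pvLoopB, List.isEmpty_nil]
    · simp only [pvLoopB, List.isEmpty_eq_false_iff.mpr hp, Bool.false_eq_true, if_false]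
      rw [ih]
      by_cases hmem : it ∈ pending
      · by_cases hin : PySem.Chars.isIn it.toList line.toList = true
        · have h1 : it ∉ pending.filter (fun it => decide ¬ PySem.Str.isIn it line = true) := by
            simp [List.mem_filter, hin]
          rw [if_neg h1, pv_get?_foldl_insert_const]
          have h2 : it ∈ pending.filter (fun it => PySem.Str.isIn it line) := by
            simp [List.mem_filter, hmem, hin]
          simp [pvFindA, hin, hmem, h2]
        · have h1 : it ∈ pending.filter (fun it => decide ¬ PySem.Str.isIn it line = true) := by
            simp [List.mem_filter, hmem, hin]
          rw [if_pos h1, if_pos hmem]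
          have h2 : it ∉ pending.filter (fun it => PySem.Str.isIn it line) := by
            simp [List.mem_filter, hin]
          simp only [pvFindA, PySem.Str.isIn_eq, hin, if_false]
          cases hF : pvFindA it rest with
          | none => simp [pv_get?_foldl_insert_const, hin]
          | some p => rfl
      · have h1 : it ∉ pending.filter (fun it => decide ¬ PySem.Str.isIn it line = true) := by
          simp [List.mem_filter]; intro h; exact absurd h hmem
        have h2 : it ∉ pending.filter (fun it => PySem.Str.isIn it line) := by
          simp [List.mem_filter]; intro h; exact absurd h hmem
        rw [if_neg h1, if_neg hmem, pv_get?_foldl_insert_const, if_neg h2]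

-- a hit of pvFindA on an enumeration of 'lines' carries the line at its index
theorem pv_findA_enum_get (item : String) (lines : List String) (enum : List (Int × String))
    (henum : ∀ p ∈ enum, PySem.List.pyGet? lines p.1 = some p.2)
    (i : Int) (line : String) (h : pvFindA item enum = some (i, line)) :
    PySem.List.pyGet? lines i = some line := by
  induction enum with
  | nil => simp [pvFindA] at h
  | cons p rest ih =>
    obtain ⟨j, l⟩ := p
    simp only [pvFindA] at h
    split at h
    · cases h; exact henum _ (List.mem_cons_self ..)
    · exact ih (fun q hq => henum q (List.mem_cons_of_mem _ hq)) h

theorem pv_enum_get (lines : List String) (p : Int × String)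
    (h : p ∈ PySem.List.enumerate lines) : PySem.List.pyGet? lines p.1 = some p.2 := by
  rw [PySem.List.mem_enumerate_iff] at h
  obtain ⟨k, hk, rfl⟩ := h
  simp [PySem.List.pyGet?_natCast, hk]

-- ===== VERDICT (by name: the statement is the Claim_ definition above) =====
theorem find_item_descriptions_spec : Claim_equal_find_item_descriptions := by
  intro ocr_text item_numbers _
  unfold Spec_find_item_descriptions find_item_descriptions find_item_descriptions_alt
  simp only [PySem.List.dedup_eq_ofList]
  set lines := (PySem.Str.split? ocr_text "\n").getD [] with hlines
  set found := pvLoopB lines (PySem.List.enumerate lines) (PySem.Set.ofList item_numbers) PySem.Dict.empty with hfound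
  congr 1
  apply PySem.List.foldl_congr_mem
  intro acc it hit
  have hget : found.get? it =
      (match pvFindA it (PySem.List.enumerate lines) with
       | some (i, _) => some (pvDescB lines i)
       | none => none) := by
    rw [hfound, pv_loopB_get?, if_pos ((PySem.Set.mem_ofList _ _).mpr hit)]
    cases pvFindA it (PySem.List.enumerate lines) with
    | none => simp
    | some p => rfl
  cases hF : pvFindA it (PySem.List.enumerate lines) with
  | none =>
    rw [hF] at hget; simp only at hget
    have hc : found.contains it = false := by
      rw [PySem.Dict.contains_eq_isSome_get?, hget]; rfl
    simp [hF, hc]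
  | some p =>
    obtain ⟨i, line⟩ := p
    rw [hF] at hget; simp only at hget
    have hc : found.contains it = true := by
      rw [PySem.Dict.contains_eq_isSome_get?, hget]; rfl
    have hline : PySem.List.pyGet? lines i = some line :=
      pv_findA_enum_get it lines _ (fun q hq => pv_enum_get lines q hq) i line hF
    simp only [hF, hc, if_true, hget, Option.getD_some]
    simp only [pvDescB, hline, Option.getD_some]
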